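-- pv_equiv track=rewrite | github.com/joseguillermomoreu-gif/pom-ppia | src/domain/service/test_analyzer.py | _generate_methods_from_selectors
-- ===== SOURCE A (Python) =====
-- from typing import Dict, List
--
-- def _generate_methods_from_selectors(selectors: List[str]) -> List[str]:
--     """Genera nombres de métodos desde selectores."""
--     methods: List[str] = []
--
--     # Simplificado - generar métodos genéricos
--     if any("login" in sel.lower() for sel in selectors):
--         methods.append("login(username: string, password: string): Promise<void>")
--
--     if any("name" in sel.lower() for sel in selectors):
--         methods.append("fillName(name: string): Promise<void>")
--
--     if any("submit" in sel.lower() or "button" in sel.lower() for sel in selectors):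
--         methods.append("submit(): Promise<void>")
--
--     if any("reset" in sel.lower() for sel in selectors):
--         methods.append("reset(): Promise<void>")
--
--     # Método genérico por defecto
--     if not methods:
--         methods.append("interact(): Promise<void>")
--
--     return methods
-- ===== SOURCE B (Python) =====
-- from typing import List
--
-- def _generate_methods_from_selectors(selectors: List[str]) -> List[str]:
--     """Single pass: OR substring hits into four flags, then emit methods in fixed order."""
--     has_login = has_name = has_submit = has_reset = False
--     for sel in selectors:
--         low = sel.lower()
--         has_login = has_login or "login" in low
--         has_name = has_name or "name" in low
--         has_submit = has_submit or "submit" in low or "button" in low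
--         has_reset = has_reset or "reset" in low
--
--     methods: List[str] = []
--     if has_login:
--         methods.append("login(username: string, password: string): Promise<void>")
--     if has_name:
--         methods.append("fillName(name: string): Promise<void>")
--     if has_submit:
--         methods.append("submit(): Promise<void>")
--     if has_reset:
--         methods.append("reset(): Promise<void>")
--     if not methods:
--         methods.append("interact(): Promise<void>")
--     return methods
-- ===== Notes on version B (the rewrite author's own statement) =====
-- stated objective: faster
-- what changed: Replaces A's four separate any() scans over selectors (each lowering every element again) with one flag-accumulating pass that lowers each selector once, then emits the method strings from the flags in the fixed order.
import Mathlib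
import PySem

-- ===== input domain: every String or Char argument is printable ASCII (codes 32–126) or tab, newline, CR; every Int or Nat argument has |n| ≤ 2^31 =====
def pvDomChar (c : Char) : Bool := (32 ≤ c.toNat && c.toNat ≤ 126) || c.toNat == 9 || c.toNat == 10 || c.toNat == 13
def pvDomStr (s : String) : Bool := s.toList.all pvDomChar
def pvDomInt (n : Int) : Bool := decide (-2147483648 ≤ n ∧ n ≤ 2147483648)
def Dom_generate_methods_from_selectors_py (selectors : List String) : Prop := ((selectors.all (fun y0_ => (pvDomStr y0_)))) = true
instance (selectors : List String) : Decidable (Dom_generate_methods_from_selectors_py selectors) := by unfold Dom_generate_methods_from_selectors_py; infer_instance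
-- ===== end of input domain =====

-- B makes one flag-accumulating pass (each selector lowered once) instead of A's four separate any() scans; same algorithmic cost, different decomposition.

-- ===== PORT A =====
def generate_methods_from_selectors_py (selectors : List String) : List String :=
  let methods : List String := []
  let methods := if selectors.any (fun sel => PySem.Str.isIn "login" (PySem.Str.lower sel)) then
      methods ++ ["login(username: string, password: string): Promise<void>"] else methods
  let methods := if selectors.any (fun sel => PySem.Str.isIn "name" (PySem.Str.lower sel)) then
      methods ++ ["fillName(name: string): Promise<void>"] else methods
  let methods := if selectors.any (fun sel => PySem.Str.isIn "submit" (PySem.Str.lower sel) || PySem.Str.isIn "button" (PySem.Str.lower sel)) then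
      methods ++ ["submit(): Promise<void>"] else methods
  let methods := if selectors.any (fun sel => PySem.Str.isIn "reset" (PySem.Str.lower sel)) then
      methods ++ ["reset(): Promise<void>"] else methods
  if methods = [] then methods ++ ["interact(): Promise<void>"] else methods

-- ===== PORT B =====
def generate_methods_from_selectors_py_alt (selectors : List String) : List String :=
  let flags := selectors.foldl (fun (f : Bool × Bool × Bool × Bool) sel =>
      let low := PySem.Str.lower sel
      (f.1 || PySem.Str.isIn "login" low,
       f.2.1 || PySem.Str.isIn "name" low,
       f.2.2.1 || PySem.Str.isIn "submit" low || PySem.Str.isIn "button" low,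
       f.2.2.2 || PySem.Str.isIn "reset" low)) (false, false, false, false)
  let methods : List String := []
  let methods := if flags.1 then methods ++ ["login(username: string, password: string): Promise<void>"] else methods
  let methods := if flags.2.1 then methods ++ ["fillName(name: string): Promise<void>"] else methods
  let methods := if flags.2.2.1 then methods ++ ["submit(): Promise<void>"] else methods
  let methods := if flags.2.2.2 then methods ++ ["reset(): Promise<void>"] else methods
  if methods = [] then methods ++ ["interact(): Promise<void>"] else methods

-- ===== PRECONDITION & SPEC =====
def Spec_generate_methods_from_selectors_py (selectors : List String) (out : List String) : Prop := out = generate_methods_from_selectors_py_alt selectors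
instance (selectors : List String) (out : List String) : Decidable (Spec_generate_methods_from_selectors_py selectors out) := by unfold Spec_generate_methods_from_selectors_py; infer_instance

-- ===== CLAIM (what is proved, stated in full; the proofs are below) =====
def Claim_equal_generate_methods_from_selectors_py : Prop := ∀ (selectors : List String), Dom_generate_methods_from_selectors_py selectors → Spec_generate_methods_from_selectors_py selectors (generate_methods_from_selectors_py selectors)

-- ===== LEMMAS AND PROOFS =====

-- The flag fold computes exactly the four any-scans of A.
theorem pv_flags_eq (selectors : List String) (a b c d : Bool) :
    selectors.foldl (fun (f : Bool × Bool × Bool × Bool) sel =>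
      let low := PySem.Str.lower sel
      (f.1 || PySem.Str.isIn "login" low,
       f.2.1 || PySem.Str.isIn "name" low,
       f.2.2.1 || PySem.Str.isIn "submit" low || PySem.Str.isIn "button" low,
       f.2.2.2 || PySem.Str.isIn "reset" low)) (a, b, c, d)
    = (a || selectors.any (fun sel => PySem.Str.isIn "login" (PySem.Str.lower sel)),
       b || selectors.any (fun sel => PySem.Str.isIn "name" (PySem.Str.lower sel)),
       c || selectors.any (fun sel => PySem.Str.isIn "submit" (PySem.Str.lower sel) || PySem.Str.isIn "button" (PySem.Str.lower sel)),
       d || selectors.any (fun sel => PySem.Str.isIn "reset" (PySem.Str.lower sel))) := by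
  induction selectors generalizing a b c d with
  | nil => simp
  | cons s t ih =>
    simp only [List.foldl_cons, List.any_cons, ih]
    simp [Bool.or_assoc]

-- ===== VERDICT (by name: the statement is the Claim_ definition above) =====
theorem generate_methods_from_selectors_py_spec : Claim_equal_generate_methods_from_selectors_py := by
  intro selectors _
  unfold Spec_generate_methods_from_selectors_py generate_methods_from_selectors_py generate_methods_from_selectors_py_alt
  rw [pv_flags_eq]
  simp only [Bool.false_or]
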